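-- pv_equiv track=rewrite | github.com/ManjunathReddy078/ClarifAI-Capstone | 01_Code/backend/routes/student.py | _normalize_checklist_indexes
-- ===== SOURCE A (Python) =====
-- def _normalize_checklist_indexes(raw_indexes, total_tasks: int):
-- 	if total_tasks <= 0 or not isinstance(raw_indexes, list):
-- 		return []
-- 	values = set()
-- 	for raw in raw_indexes:
-- 		try:
-- 			idx = int(raw)
-- 		except (TypeError, ValueError):
-- 			continue
-- 		if 0 <= idx < total_tasks:
-- 			values.add(idx)
-- 	return sorted(values)
-- ===== SOURCE B (Python) =====
-- def _normalize_checklist_indexes(raw_indexes, total_tasks: int):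
-- 	if total_tasks <= 0 or not isinstance(raw_indexes, list):
-- 		return []
-- 	out = []
-- 	for raw in raw_indexes:
-- 		try:
-- 			idx = int(raw)
-- 		except (TypeError, ValueError):
-- 			continue
-- 		if not (0 <= idx < total_tasks):
-- 			continue
-- 		# online insertion into the sorted, duplicate-free result list
-- 		i = 0
-- 		while i < len(out) and out[i] < idx:
-- 			i += 1
-- 		if i == len(out) or out[i] != idx:
-- 			out.insert(i, idx)
-- 	return out
-- ===== Notes on version B (the rewrite author's own statement) =====
-- stated objective: alternative
-- what changed: Replaces A's hash-set accumulation followed by a final sorted() call with a single online pass that keeps the result as a sorted duplicate-free list and inserts each valid index at its position (insertion-sort with dedup), so no set and no sort call exist.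
import Mathlib
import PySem

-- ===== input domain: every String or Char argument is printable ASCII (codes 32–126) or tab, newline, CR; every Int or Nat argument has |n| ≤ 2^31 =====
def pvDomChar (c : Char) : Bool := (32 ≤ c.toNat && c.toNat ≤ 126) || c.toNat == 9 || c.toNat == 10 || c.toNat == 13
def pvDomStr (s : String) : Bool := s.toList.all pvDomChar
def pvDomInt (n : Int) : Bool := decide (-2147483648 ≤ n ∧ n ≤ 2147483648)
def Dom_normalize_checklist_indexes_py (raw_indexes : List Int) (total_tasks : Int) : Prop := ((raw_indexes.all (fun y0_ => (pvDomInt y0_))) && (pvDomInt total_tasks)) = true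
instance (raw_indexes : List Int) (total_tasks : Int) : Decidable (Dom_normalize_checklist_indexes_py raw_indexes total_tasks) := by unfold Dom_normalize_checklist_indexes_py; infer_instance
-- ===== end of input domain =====

-- B replaces A's set accumulation + final sorted() by a single pass inserting each valid index
-- into a sorted duplicate-free result list (alternative decomposition; no set, no sort call).


-- ===== PORT A =====
-- raw_indexes is typed List Int, so `isinstance(raw_indexes, list)` is true and `int(raw)` is the
-- identity and never raises; the try/except is therefore the identity on this domain.
def normalize_checklist_indexes_py (raw_indexes : List Int) (total_tasks : Int) : List Int :=
  if total_tasks ≤ 0 then []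
  else
    let values : PySem.Set Int :=
      raw_indexes.foldl
        (fun s raw => if 0 ≤ raw ∧ raw < total_tasks then PySem.Set.add s raw else s)
        PySem.Set.empty
    PySem.List.sorted values (fun x => x) false

-- ===== PORT B =====
-- Source B's `while i < len(out) and out[i] < idx` walk followed by the skip-or-insert is the
-- structural recursion below: walk past smaller heads; stop at an equal head (skip) or at the
-- insertion point / end of list (insert).
def insertSortedUnique : List Int → Int → List Int
  | [], idx => [idx]
  | x :: t, idx =>
      if x < idx then x :: insertSortedUnique t idx
      else if x = idx then x :: t
      else idx :: x :: t

def normalize_checklist_indexes_py_alt (raw_indexes : List Int) (total_tasks : Int) : List Int :=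
  if total_tasks ≤ 0 then []
  else
    raw_indexes.foldl
      (fun out raw => if 0 ≤ raw ∧ raw < total_tasks then insertSortedUnique out raw else out)
      []

-- ===== PRECONDITION & SPEC =====
def Spec_normalize_checklist_indexes_py (raw_indexes : List Int) (total_tasks : Int) (out : List Int) : Prop := out = normalize_checklist_indexes_py_alt raw_indexes total_tasks
instance (raw_indexes : List Int) (total_tasks : Int) (out : List Int) : Decidable (Spec_normalize_checklist_indexes_py raw_indexes total_tasks out) := by unfold Spec_normalize_checklist_indexes_py; infer_instance

-- ===== CLAIM (what is proved, stated in full; the proofs are below) =====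
def Claim_equal_normalize_checklist_indexes_py : Prop := ∀ (raw_indexes : List Int) (total_tasks : Int), Dom_normalize_checklist_indexes_py raw_indexes total_tasks → Spec_normalize_checklist_indexes_py raw_indexes total_tasks (normalize_checklist_indexes_py raw_indexes total_tasks)

-- ===== LEMMAS AND PROOFS =====

lemma mem_insertSortedUnique (l : List Int) (a y : Int) :
    y ∈ insertSortedUnique l a ↔ y ∈ l ∨ y = a := by
  induction l with
  | nil => simp [insertSortedUnique]
  | cons x t ih =>
    unfold insertSortedUnique
    split_ifs with h1 h2
    · simp [ih]; tauto
    · subst h2; simp; tauto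
    · simp; tauto

lemma pairwise_insertSortedUnique (l : List Int) (a : Int)
    (hl : l.Pairwise (· < ·)) : (insertSortedUnique l a).Pairwise (· < ·) := by
  induction l with
  | nil => simp [insertSortedUnique]
  | cons x t ih =>
    have hx : ∀ y ∈ t, x < y := (List.pairwise_cons.mp hl).1
    have ht : t.Pairwise (· < ·) := (List.pairwise_cons.mp hl).2
    unfold insertSortedUnique
    split_ifs with h1 h2
    · refine List.pairwise_cons.mpr ⟨?_, ih ht⟩
      intro y hy
      rcases (mem_insertSortedUnique t a y).mp hy with h | rfl
      · exact hx y h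
      · exact h1
    · exact hl
    · refine List.pairwise_cons.mpr ⟨?_, hl⟩
      intro y hy
      rcases List.mem_cons.mp hy with rfl | h
      · omega
      · exact lt_trans (by omega) (hx y h)

-- the fold of B: accumulator stays sorted-unique and collects exactly the valid elements seen
lemma fold_insert_spec (p : Int → Prop) [DecidablePred p] (xs : List Int) : ∀ (acc : List Int),
    acc.Pairwise (· < ·) →
    (xs.foldl (fun out x => if p x then insertSortedUnique out x else out) acc).Pairwise (· < ·) ∧
    (∀ y, y ∈ xs.foldl (fun out x => if p x then insertSortedUnique out x else out) acc ↔
        y ∈ acc ∨ (y ∈ xs ∧ p y)) := by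
  induction xs with
  | nil => intro acc h; exact ⟨h, fun y => by simp⟩
  | cons x t ih =>
    intro acc hacc
    by_cases hp : p x
    · have := ih (insertSortedUnique acc x) (pairwise_insertSortedUnique acc x hacc)
      simp only [List.foldl_cons, hp, if_true]
      refine ⟨this.1, fun y => ?_⟩
      rw [this.2 y, mem_insertSortedUnique]
      simp [List.mem_cons]
      constructor
      · rintro ((h | rfl) | ⟨h, hpy⟩) <;> tauto
      · rintro (h | ⟨(rfl | h), hpy⟩) <;> tauto
    · have := ih acc hacc
      simp only [List.foldl_cons, hp, if_false]
      refine ⟨this.1, fun y => ?_⟩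
      rw [this.2 y]
      constructor
      · rintro (h | ⟨h, hpy⟩)
        · exact Or.inl h
        · exact Or.inr ⟨List.mem_cons_of_mem _ h, hpy⟩
      · rintro (h | ⟨h, hpy⟩)
        · exact Or.inl h
        · rcases List.mem_cons.mp h with rfl | h'
          · exact absurd hpy hp
          · exact Or.inr ⟨h', hpy⟩

lemma key_equiv (raw_indexes : List Int) (total_tasks : Int) :
    normalize_checklist_indexes_py raw_indexes total_tasks
      = normalize_checklist_indexes_py_alt raw_indexes total_tasks := by
  unfold normalize_checklist_indexes_py normalize_checklist_indexes_py_alt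
  by_cases h0 : total_tasks ≤ 0
  · simp [h0]
  · simp only [h0, if_false]
    set p : Int → Prop := fun x => 0 ≤ x ∧ x < total_tasks with hp
    set f : List Int := raw_indexes.filter (fun x => decide (p x)) with hf
    -- A's set fold is set(filter)
    have hA : raw_indexes.foldl
        (fun s raw => if 0 ≤ raw ∧ raw < total_tasks then PySem.Set.add s raw else s)
        PySem.Set.empty = PySem.Set.ofList f := by
      rw [PySem.List.foldl_ite_eq_foldl_filter]
      rfl
    rw [hA]
    have hB := fold_insert_spec p raw_indexes [] List.Pairwise.nil
    set r := raw_indexes.foldl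
        (fun out x => if p x then insertSortedUnique out x else out) ([] : List Int) with hr
    have hrlt : r.Pairwise (· < ·) := hB.1
    have hrnodup : r.Nodup := hrlt.imp (fun h => ne_of_lt h)
    have hperm : r.Perm (PySem.Set.ofList f) := by
      rw [List.perm_ext_iff_of_nodup hrnodup (PySem.Set.nodup_ofList f)]
      intro a
      rw [PySem.Set.mem_ofList, (hB.2 a), hf]
      simp [List.mem_filter]
    exact PySem.List.sorted_eq_of_perm_of_pairwise_lt (ys := r)
      (xs := PySem.Set.ofList f) (key := fun x => x) hperm hrlt

-- ===== VERDICT (by name: the statement is the Claim_ definition above) =====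
theorem normalize_checklist_indexes_py_spec : Claim_equal_normalize_checklist_indexes_py := by
  intro raw_indexes total_tasks _
  exact key_equiv raw_indexes total_tasks
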